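-- pv_equiv track=rewrite | github.com/Addyyaa/testTool | fileTransfer/gui/main_window.py | _determine_file_type
-- ===== SOURCE A (Python) =====
-- def _determine_file_type(permissions: str, name: str) -> str:
--     """根据权限和文件名判断文件类型"""
--     if permissions.startswith('d'):
--         return 'directory'
--     if permissions.startswith('l'):
--         return 'link'
--     if 'x' in permissions[1:4]:
--         return 'executable'
--
--     name_lower = name.lower()
--     if any(name_lower.endswith(ext) for ext in ['.png', '.jpg', '.jpeg', '.gif', '.bmp', '.svg']):
--         return 'image'
--     if any(name_lower.endswith(ext) for ext in ['.txt', '.doc', '.docx', '.pdf', '.md']):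
--         return 'document'
--     if any(name_lower.endswith(ext) for ext in ['.zip', '.tar', '.gz', '.bz2', '.rar', '.7z']):
--         return 'archive'
--     if any(name_lower.endswith(ext) for ext in ['.conf', '.cfg', '.ini', '.yaml', '.yml', '.json']):
--         return 'config'
--     if any(name_lower.endswith(ext) for ext in ['.sh', '.py', '.pl', '.rb', '.js']):
--         return 'script'
--
--     return 'file'
-- ===== SOURCE B (Python) =====
-- _EXT_CATEGORY = {
--     '.png': 'image', '.jpg': 'image', '.jpeg': 'image', '.gif': 'image',
--     '.bmp': 'image', '.svg': 'image',
--     '.txt': 'document', '.doc': 'document', '.docx': 'document',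
--     '.pdf': 'document', '.md': 'document',
--     '.zip': 'archive', '.tar': 'archive', '.gz': 'archive',
--     '.bz2': 'archive', '.rar': 'archive', '.7z': 'archive',
--     '.conf': 'config', '.cfg': 'config', '.ini': 'config',
--     '.yaml': 'config', '.yml': 'config', '.json': 'config',
--     '.sh': 'script', '.py': 'script', '.pl': 'script',
--     '.rb': 'script', '.js': 'script',
-- }
--
--
-- def _determine_file_type(permissions: str, name: str) -> str:
--     """根据权限和文件名判断文件类型"""
--     if permissions.startswith('d'):
--         return 'directory'
--     if permissions.startswith('l'):
--         return 'link'
--     if 'x' in permissions[1:4]: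
--         return 'executable'
--
--     name_lower = name.lower()
--     dot = name_lower.rfind('.')
--     if dot == -1:
--         return 'file'
--     return _EXT_CATEGORY.get(name_lower[dot:], 'file')
-- ===== Notes on version B (the rewrite author's own statement) =====
-- stated objective: simpler
-- what changed: Replaces A's five sequential any(endswith) scans over 28 extension literals by computing the lowercased name's last-dot suffix once with rfind and doing a single lookup in an extension-to-category dict (defaulting to 'file').
import Mathlib
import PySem

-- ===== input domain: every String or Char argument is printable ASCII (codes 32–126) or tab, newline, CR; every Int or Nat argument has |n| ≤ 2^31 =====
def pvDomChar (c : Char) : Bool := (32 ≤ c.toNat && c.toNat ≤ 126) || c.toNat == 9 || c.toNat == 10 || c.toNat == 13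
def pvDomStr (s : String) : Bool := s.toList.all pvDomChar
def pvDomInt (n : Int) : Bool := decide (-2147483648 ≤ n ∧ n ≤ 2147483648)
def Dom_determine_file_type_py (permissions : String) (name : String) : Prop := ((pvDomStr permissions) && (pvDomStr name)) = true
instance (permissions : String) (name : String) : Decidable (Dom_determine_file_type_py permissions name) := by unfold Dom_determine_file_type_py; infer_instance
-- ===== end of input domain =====

-- B replaces A's five sequential endswith scans by computing the lowercased name's last-dot suffix once (rfind) and a single table lookup (objective: simpler).

-- ===== PORT A =====
def determine_file_type_py (permissions : String) (name : String) : String :=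
  if PySem.Str.startswith permissions "d" then "directory"
  else if PySem.Str.startswith permissions "l" then "link"
  else if PySem.Str.isIn "x" (PySem.Str.slice permissions (some 1) (some 4)) then "executable"
  else
    let name_lower := PySem.Str.lower name
    if [".png", ".jpg", ".jpeg", ".gif", ".bmp", ".svg"].any (fun ext => PySem.Str.endswith name_lower ext) then "image"
        else if [".txt", ".doc", ".docx", ".pdf", ".md"].any (fun ext => PySem.Str.endswith name_lower ext) then "document"
        else if [".zip", ".tar", ".gz", ".bz2", ".rar", ".7z"].any (fun ext => PySem.Str.endswith name_lower ext) then "archive"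
        else if [".conf", ".cfg", ".ini", ".yaml", ".yml", ".json"].any (fun ext => PySem.Str.endswith name_lower ext) then "config"
        else if [".sh", ".py", ".pl", ".rb", ".js"].any (fun ext => PySem.Str.endswith name_lower ext) then "script"
    else "file"

-- ===== PORT B =====
-- the module-level dict literal _EXT_CATEGORY of Source B (insertion order, no duplicate keys)
def pvExtCategory : PySem.Dict String String := ⟨[(".png", "image"), (".jpg", "image"), (".jpeg", "image"), (".gif", "image"), (".bmp", "image"), (".svg", "image"), (".txt", "document"), (".doc", "document"), (".docx", "document"), (".pdf", "document"), (".md", "document"), (".zip", "archive"), (".tar", "archive"), (".gz", "archive"), (".bz2", "archive"), (".rar", "archive"), (".7z", "archive"), (".conf", "config"), (".cfg", "config"), (".ini", "config"), (".yaml", "config"), (".yml", "config"), (".json", "config"), (".sh", "script"), (".py", "script"), (".pl", "script"), (".rb", "script"), (".js", "script")]⟩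

def determine_file_type_py_alt (permissions : String) (name : String) : String :=
  if PySem.Str.startswith permissions "d" then "directory"
  else if PySem.Str.startswith permissions "l" then "link"
  else if PySem.Str.isIn "x" (PySem.Str.slice permissions (some 1) (some 4)) then "executable"
  else
    let name_lower := PySem.Str.lower name
    let dot := PySem.Str.rfind name_lower "."
    if dot == -1 then "file"
    else PySem.Dict.getD pvExtCategory (PySem.Str.slice name_lower (some dot) none) "file"

-- ===== PRECONDITION & SPEC =====
def Spec_determine_file_type_py (permissions : String) (name : String) (out : String) : Prop := out = determine_file_type_py_alt permissions name
instance (permissions : String) (name : String) (out : String) : Decidable (Spec_determine_file_type_py permissions name out) := by unfold Spec_determine_file_type_py; infer_instance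

-- ===== CLAIM (what is proved, stated in full; the proofs are below) =====
def Claim_equal_determine_file_type_py : Prop := ∀ (permissions : String) (name : String), Dom_determine_file_type_py permissions name → Spec_determine_file_type_py permissions name (determine_file_type_py permissions name)

-- ===== LEMMAS AND PROOFS =====

-- ['.'] is a prefix of l iff l starts with '.'
lemma pv_sing_pref (l : List Char) : (List.isPrefixOf ['.'] l) = (l.head? == some '.') := by
  cases l <;> simp [List.isPrefixOf, eq_comm]

-- PySem.Chars.rfind.go returns -1 (no match at any index ≤ x) or the greatest match position ≤ x
lemma pv_go_spec (s sub : List Char) (x : Nat) :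
    (PySem.Chars.rfind.go s sub x = -1 ∧ ∀ i : Nat, i ≤ x → ¬ (List.isPrefixOf sub (s.drop i) = true)) ∨
    (∃ j : Nat, PySem.Chars.rfind.go s sub x = (j : Int) ∧ j ≤ x ∧ List.isPrefixOf sub (s.drop j) = true ∧
      ∀ i : Nat, j < i → i ≤ x → ¬ (List.isPrefixOf sub (s.drop i) = true)) := by
  induction x with
  | zero =>
    by_cases h : List.isPrefixOf sub s = true
    · right
      exact ⟨0, by simp [PySem.Chars.rfind.go, h], Nat.le_refl 0, by simpa using h,
        fun i hi hle => by omega⟩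
    · left
      refine ⟨by simp [PySem.Chars.rfind.go, h], fun i hi => ?_⟩
      interval_cases i
      simpa using h
  | succ n ih =>
    by_cases h : List.isPrefixOf sub (s.drop (n + 1)) = true
    · right
      exact ⟨n + 1, by simp [PySem.Chars.rfind.go, h], Nat.le_refl _, h, fun i hi hle => by omega⟩
    · have hgo : PySem.Chars.rfind.go s sub (n + 1) = PySem.Chars.rfind.go s sub n := by
        simp [PySem.Chars.rfind.go, h]
      rcases ih with ⟨he, hall⟩ | ⟨j, hj_eq, hjle, hj, hmax⟩
      · refine Or.inl ⟨by rw [hgo, he], fun i hi => ?_⟩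
        rcases Nat.lt_or_ge i (n + 1) with hlt | hge
        · exact hall i (by omega)
        · have hin : i = n + 1 := by omega
          subst hin; exact fun hc => h hc
      · refine Or.inr ⟨j, by rw [hgo, hj_eq], by omega, hj, fun i hi hle => ?_⟩
        rcases Nat.lt_or_ge i (n + 1) with hlt | hge
        · exact hmax i hi (by omega)
        · have hin : i = n + 1 := by omega
          subst hin; exact fun hc => h hc

-- if no position of cs starts with '.', nothing containing '.' is a suffix of cs
lemma pv_no_dot (cs e : List Char) (he : '.' ∈ e)
    (hnone : ∀ i : Nat, i ≤ cs.length → ¬ (List.isPrefixOf ['.'] (cs.drop i) = true)) :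
    PySem.Chars.endswith cs e = false := by
  rw [Bool.eq_false_iff]
  intro hc
  have hsuf : e <:+ cs := by
    simpa [PySem.Chars.endswith, List.isSuffixOf_iff_suffix] using hc
  obtain ⟨p, hp⟩ := hsuf
  obtain ⟨e1, e2, he12⟩ := List.append_of_mem he
  have hdrop : cs.drop (p.length + e1.length) = '.' :: e2 := by
    subst hp he12
    rw [← List.append_assoc, show p.length + e1.length = (p ++ e1).length by simp,
        List.drop_left]
  have hlen : p.length + e1.length ≤ cs.length := by
    subst hp he12; simp
  exact hnone (p.length + e1.length) hlen (by rw [pv_sing_pref, hdrop]; simp)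

-- with the LAST '.' of cs at position j, a one-dot extension is a suffix of cs iff it IS cs.drop j
lemma pv_last_dot (cs e : List Char) (hee : e.head? = some '.') (ht : '.' ∉ e.tail) (j : Nat)
    (hj : List.isPrefixOf ['.'] (cs.drop j) = true)
    (hmax : ∀ i : Nat, j < i → i ≤ cs.length → ¬ (List.isPrefixOf ['.'] (cs.drop i) = true)) :
    PySem.Chars.endswith cs e = decide (cs.drop j = e) := by
  cases e with
  | nil => simp at hee
  | cons c t =>
    simp only [List.head?_cons, Option.some.injEq] at hee
    subst hee
    simp only [List.tail_cons] at ht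
    by_cases hu : cs.drop j = '.' :: t
    · have hsuf : ('.' :: t) <:+ cs := hu ▸ List.drop_suffix j cs
      simp [PySem.Chars.endswith, List.isSuffixOf_iff_suffix, hsuf, hu]
    · simp only [hu, decide_false]
      rw [Bool.eq_false_iff]
      intro hc
      have hsuf : ('.' :: t) <:+ cs := by
        simpa [PySem.Chars.endswith, List.isSuffixOf_iff_suffix] using hc
      obtain ⟨p, hp⟩ := hsuf
      have hdp : cs.drop p.length = '.' :: t := by subst hp; exact List.drop_left
      have hple : p.length ≤ cs.length := by subst hp; simp
      have h1 : p.length ≤ j := by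
        by_contra hgt
        exact hmax p.length (by omega) hple (by rw [pv_sing_pref, hdp]; simp)
      have h2 : ¬ p.length < j := by
        intro hlt
        obtain ⟨k, hk⟩ : ∃ k : Nat, j = p.length + (k + 1) := ⟨j - p.length - 1, by omega⟩
        have hdj : cs.drop j = t.drop k := by
          subst hp hk
          rw [List.drop_length_add_append]
          simp
        rw [pv_sing_pref, hdj] at hj
        have hmem : '.' ∈ t.drop k := by
          cases hdk : t.drop k with
          | nil => rw [hdk] at hj; simp at hj
          | cons a l =>
            rw [hdk] at hj; simp at hj
            simp [hj]
        exact ht (List.drop_subset k t hmem)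
      have hpj : p.length = j := by omega
      exact hu (hpj ▸ hdp)

-- the extension-classification tails of the two ports agree on every string
lemma pv_tail (s : String) :
    (if [".png", ".jpg", ".jpeg", ".gif", ".bmp", ".svg"].any (fun ext => PySem.Str.endswith s ext) then "image"
         else if [".txt", ".doc", ".docx", ".pdf", ".md"].any (fun ext => PySem.Str.endswith s ext) then "document"
         else if [".zip", ".tar", ".gz", ".bz2", ".rar", ".7z"].any (fun ext => PySem.Str.endswith s ext) then "archive"
         else if [".conf", ".cfg", ".ini", ".yaml", ".yml", ".json"].any (fun ext => PySem.Str.endswith s ext) then "config"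
         else if [".sh", ".py", ".pl", ".rb", ".js"].any (fun ext => PySem.Str.endswith s ext) then "script"
     else "file")
    = (let dot := PySem.Str.rfind s ".";
       if dot == -1 then "file"
       else PySem.Dict.getD pvExtCategory (PySem.Str.slice s (some dot) none) "file") := by
  rcases pv_go_spec s.toList ['.'] s.toList.length with ⟨hneg, hnone⟩ | ⟨j, hj_eq, hjle, hj, hmax⟩
  · have hrneg : PySem.Chars.rfind s.toList ['.'] = -1 := hneg
    have f_png : PySem.Chars.endswith s.toList ['.', 'p', 'n', 'g'] = false :=
      pv_no_dot s.toList ['.', 'p', 'n', 'g'] (by decide) (fun i hi => hnone i hi)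
    have f_jpg : PySem.Chars.endswith s.toList ['.', 'j', 'p', 'g'] = false :=
      pv_no_dot s.toList ['.', 'j', 'p', 'g'] (by decide) (fun i hi => hnone i hi)
    have f_jpeg : PySem.Chars.endswith s.toList ['.', 'j', 'p', 'e', 'g'] = false :=
      pv_no_dot s.toList ['.', 'j', 'p', 'e', 'g'] (by decide) (fun i hi => hnone i hi)
    have f_gif : PySem.Chars.endswith s.toList ['.', 'g', 'i', 'f'] = false :=
      pv_no_dot s.toList ['.', 'g', 'i', 'f'] (by decide) (fun i hi => hnone i hi)
    have f_bmp : PySem.Chars.endswith s.toList ['.', 'b', 'm', 'p'] = false :=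
      pv_no_dot s.toList ['.', 'b', 'm', 'p'] (by decide) (fun i hi => hnone i hi)
    have f_svg : PySem.Chars.endswith s.toList ['.', 's', 'v', 'g'] = false :=
      pv_no_dot s.toList ['.', 's', 'v', 'g'] (by decide) (fun i hi => hnone i hi)
    have f_txt : PySem.Chars.endswith s.toList ['.', 't', 'x', 't'] = false :=
      pv_no_dot s.toList ['.', 't', 'x', 't'] (by decide) (fun i hi => hnone i hi)
    have f_doc : PySem.Chars.endswith s.toList ['.', 'd', 'o', 'c'] = false :=
      pv_no_dot s.toList ['.', 'd', 'o', 'c'] (by decide) (fun i hi => hnone i hi)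
    have f_docx : PySem.Chars.endswith s.toList ['.', 'd', 'o', 'c', 'x'] = false :=
      pv_no_dot s.toList ['.', 'd', 'o', 'c', 'x'] (by decide) (fun i hi => hnone i hi)
    have f_pdf : PySem.Chars.endswith s.toList ['.', 'p', 'd', 'f'] = false :=
      pv_no_dot s.toList ['.', 'p', 'd', 'f'] (by decide) (fun i hi => hnone i hi)
    have f_md : PySem.Chars.endswith s.toList ['.', 'm', 'd'] = false :=
      pv_no_dot s.toList ['.', 'm', 'd'] (by decide) (fun i hi => hnone i hi)
    have f_zip : PySem.Chars.endswith s.toList ['.', 'z', 'i', 'p'] = false :=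
      pv_no_dot s.toList ['.', 'z', 'i', 'p'] (by decide) (fun i hi => hnone i hi)
    have f_tar : PySem.Chars.endswith s.toList ['.', 't', 'a', 'r'] = false :=
      pv_no_dot s.toList ['.', 't', 'a', 'r'] (by decide) (fun i hi => hnone i hi)
    have f_gz : PySem.Chars.endswith s.toList ['.', 'g', 'z'] = false :=
      pv_no_dot s.toList ['.', 'g', 'z'] (by decide) (fun i hi => hnone i hi)
    have f_bz2 : PySem.Chars.endswith s.toList ['.', 'b', 'z', '2'] = false :=
      pv_no_dot s.toList ['.', 'b', 'z', '2'] (by decide) (fun i hi => hnone i hi)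
    have f_rar : PySem.Chars.endswith s.toList ['.', 'r', 'a', 'r'] = false :=
      pv_no_dot s.toList ['.', 'r', 'a', 'r'] (by decide) (fun i hi => hnone i hi)
    have f_svz : PySem.Chars.endswith s.toList ['.', '7', 'z'] = false :=
      pv_no_dot s.toList ['.', '7', 'z'] (by decide) (fun i hi => hnone i hi)
    have f_conf : PySem.Chars.endswith s.toList ['.', 'c', 'o', 'n', 'f'] = false :=
      pv_no_dot s.toList ['.', 'c', 'o', 'n', 'f'] (by decide) (fun i hi => hnone i hi)
    have f_cfg : PySem.Chars.endswith s.toList ['.', 'c', 'f', 'g'] = false :=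
      pv_no_dot s.toList ['.', 'c', 'f', 'g'] (by decide) (fun i hi => hnone i hi)
    have f_ini : PySem.Chars.endswith s.toList ['.', 'i', 'n', 'i'] = false :=
      pv_no_dot s.toList ['.', 'i', 'n', 'i'] (by decide) (fun i hi => hnone i hi)
    have f_yaml : PySem.Chars.endswith s.toList ['.', 'y', 'a', 'm', 'l'] = false :=
      pv_no_dot s.toList ['.', 'y', 'a', 'm', 'l'] (by decide) (fun i hi => hnone i hi)
    have f_yml : PySem.Chars.endswith s.toList ['.', 'y', 'm', 'l'] = false :=
      pv_no_dot s.toList ['.', 'y', 'm', 'l'] (by decide) (fun i hi => hnone i hi)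
    have f_json : PySem.Chars.endswith s.toList ['.', 'j', 's', 'o', 'n'] = false :=
      pv_no_dot s.toList ['.', 'j', 's', 'o', 'n'] (by decide) (fun i hi => hnone i hi)
    have f_sh : PySem.Chars.endswith s.toList ['.', 's', 'h'] = false :=
      pv_no_dot s.toList ['.', 's', 'h'] (by decide) (fun i hi => hnone i hi)
    have f_py : PySem.Chars.endswith s.toList ['.', 'p', 'y'] = false :=
      pv_no_dot s.toList ['.', 'p', 'y'] (by decide) (fun i hi => hnone i hi)
    have f_pl : PySem.Chars.endswith s.toList ['.', 'p', 'l'] = false :=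
      pv_no_dot s.toList ['.', 'p', 'l'] (by decide) (fun i hi => hnone i hi)
    have f_rb : PySem.Chars.endswith s.toList ['.', 'r', 'b'] = false :=
      pv_no_dot s.toList ['.', 'r', 'b'] (by decide) (fun i hi => hnone i hi)
    have f_js : PySem.Chars.endswith s.toList ['.', 'j', 's'] = false :=
      pv_no_dot s.toList ['.', 'j', 's'] (by decide) (fun i hi => hnone i hi)
    simp [hrneg, f_png, f_jpg, f_jpeg, f_gif, f_bmp, f_svg, f_txt, f_doc, f_docx, f_pdf, f_md, f_zip, f_tar, f_gz, f_bz2, f_rar, f_svz, f_conf, f_cfg, f_ini, f_yaml, f_yml, f_json, f_sh, f_py, f_pl, f_rb, f_js]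
  · have hrj : PySem.Chars.rfind s.toList ['.'] = ((j : Nat) : Int) := hj_eq
    have hq : (((j : Nat) : Int) == (-1 : Int)) = false := by
      simp only [beq_eq_false_iff_ne, ne_eq]
      omega
    have hu : (PySem.Str.slice s (some ((j : Nat) : Int)) none).toList = s.toList.drop j := by
      rw [PySem.Str.toList_slice, PySem.Chars.slice_eq_listSlice, PySem.List.slice_from_natCast]
    have h_png : PySem.Chars.endswith s.toList ['.', 'p', 'n', 'g'] = decide (s.toList.drop j = ['.', 'p', 'n', 'g']) :=
      pv_last_dot s.toList ['.', 'p', 'n', 'g'] (by decide) (by decide) j hj hmax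
    have h_jpg : PySem.Chars.endswith s.toList ['.', 'j', 'p', 'g'] = decide (s.toList.drop j = ['.', 'j', 'p', 'g']) :=
      pv_last_dot s.toList ['.', 'j', 'p', 'g'] (by decide) (by decide) j hj hmax
    have h_jpeg : PySem.Chars.endswith s.toList ['.', 'j', 'p', 'e', 'g'] = decide (s.toList.drop j = ['.', 'j', 'p', 'e', 'g']) :=
      pv_last_dot s.toList ['.', 'j', 'p', 'e', 'g'] (by decide) (by decide) j hj hmax
    have h_gif : PySem.Chars.endswith s.toList ['.', 'g', 'i', 'f'] = decide (s.toList.drop j = ['.', 'g', 'i', 'f']) :=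
      pv_last_dot s.toList ['.', 'g', 'i', 'f'] (by decide) (by decide) j hj hmax
    have h_bmp : PySem.Chars.endswith s.toList ['.', 'b', 'm', 'p'] = decide (s.toList.drop j = ['.', 'b', 'm', 'p']) :=
      pv_last_dot s.toList ['.', 'b', 'm', 'p'] (by decide) (by decide) j hj hmax
    have h_svg : PySem.Chars.endswith s.toList ['.', 's', 'v', 'g'] = decide (s.toList.drop j = ['.', 's', 'v', 'g']) :=
      pv_last_dot s.toList ['.', 's', 'v', 'g'] (by decide) (by decide) j hj hmax
    have h_txt : PySem.Chars.endswith s.toList ['.', 't', 'x', 't'] = decide (s.toList.drop j = ['.', 't', 'x', 't']) :=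
      pv_last_dot s.toList ['.', 't', 'x', 't'] (by decide) (by decide) j hj hmax
    have h_doc : PySem.Chars.endswith s.toList ['.', 'd', 'o', 'c'] = decide (s.toList.drop j = ['.', 'd', 'o', 'c']) :=
      pv_last_dot s.toList ['.', 'd', 'o', 'c'] (by decide) (by decide) j hj hmax
    have h_docx : PySem.Chars.endswith s.toList ['.', 'd', 'o', 'c', 'x'] = decide (s.toList.drop j = ['.', 'd', 'o', 'c', 'x']) :=
      pv_last_dot s.toList ['.', 'd', 'o', 'c', 'x'] (by decide) (by decide) j hj hmax
    have h_pdf : PySem.Chars.endswith s.toList ['.', 'p', 'd', 'f'] = decide (s.toList.drop j = ['.', 'p', 'd', 'f']) :=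
      pv_last_dot s.toList ['.', 'p', 'd', 'f'] (by decide) (by decide) j hj hmax
    have h_md : PySem.Chars.endswith s.toList ['.', 'm', 'd'] = decide (s.toList.drop j = ['.', 'm', 'd']) :=
      pv_last_dot s.toList ['.', 'm', 'd'] (by decide) (by decide) j hj hmax
    have h_zip : PySem.Chars.endswith s.toList ['.', 'z', 'i', 'p'] = decide (s.toList.drop j = ['.', 'z', 'i', 'p']) :=
      pv_last_dot s.toList ['.', 'z', 'i', 'p'] (by decide) (by decide) j hj hmax
    have h_tar : PySem.Chars.endswith s.toList ['.', 't', 'a', 'r'] = decide (s.toList.drop j = ['.', 't', 'a', 'r']) :=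
      pv_last_dot s.toList ['.', 't', 'a', 'r'] (by decide) (by decide) j hj hmax
    have h_gz : PySem.Chars.endswith s.toList ['.', 'g', 'z'] = decide (s.toList.drop j = ['.', 'g', 'z']) :=
      pv_last_dot s.toList ['.', 'g', 'z'] (by decide) (by decide) j hj hmax
    have h_bz2 : PySem.Chars.endswith s.toList ['.', 'b', 'z', '2'] = decide (s.toList.drop j = ['.', 'b', 'z', '2']) :=
      pv_last_dot s.toList ['.', 'b', 'z', '2'] (by decide) (by decide) j hj hmax
    have h_rar : PySem.Chars.endswith s.toList ['.', 'r', 'a', 'r'] = decide (s.toList.drop j = ['.', 'r', 'a', 'r']) :=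
      pv_last_dot s.toList ['.', 'r', 'a', 'r'] (by decide) (by decide) j hj hmax
    have h_svz : PySem.Chars.endswith s.toList ['.', '7', 'z'] = decide (s.toList.drop j = ['.', '7', 'z']) :=
      pv_last_dot s.toList ['.', '7', 'z'] (by decide) (by decide) j hj hmax
    have h_conf : PySem.Chars.endswith s.toList ['.', 'c', 'o', 'n', 'f'] = decide (s.toList.drop j = ['.', 'c', 'o', 'n', 'f']) :=
      pv_last_dot s.toList ['.', 'c', 'o', 'n', 'f'] (by decide) (by decide) j hj hmax
    have h_cfg : PySem.Chars.endswith s.toList ['.', 'c', 'f', 'g'] = decide (s.toList.drop j = ['.', 'c', 'f', 'g']) :=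
      pv_last_dot s.toList ['.', 'c', 'f', 'g'] (by decide) (by decide) j hj hmax
    have h_ini : PySem.Chars.endswith s.toList ['.', 'i', 'n', 'i'] = decide (s.toList.drop j = ['.', 'i', 'n', 'i']) :=
      pv_last_dot s.toList ['.', 'i', 'n', 'i'] (by decide) (by decide) j hj hmax
    have h_yaml : PySem.Chars.endswith s.toList ['.', 'y', 'a', 'm', 'l'] = decide (s.toList.drop j = ['.', 'y', 'a', 'm', 'l']) :=
      pv_last_dot s.toList ['.', 'y', 'a', 'm', 'l'] (by decide) (by decide) j hj hmax
    have h_yml : PySem.Chars.endswith s.toList ['.', 'y', 'm', 'l'] = decide (s.toList.drop j = ['.', 'y', 'm', 'l']) :=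
      pv_last_dot s.toList ['.', 'y', 'm', 'l'] (by decide) (by decide) j hj hmax
    have h_json : PySem.Chars.endswith s.toList ['.', 'j', 's', 'o', 'n'] = decide (s.toList.drop j = ['.', 'j', 's', 'o', 'n']) :=
      pv_last_dot s.toList ['.', 'j', 's', 'o', 'n'] (by decide) (by decide) j hj hmax
    have h_sh : PySem.Chars.endswith s.toList ['.', 's', 'h'] = decide (s.toList.drop j = ['.', 's', 'h']) :=
      pv_last_dot s.toList ['.', 's', 'h'] (by decide) (by decide) j hj hmax
    have h_py : PySem.Chars.endswith s.toList ['.', 'p', 'y'] = decide (s.toList.drop j = ['.', 'p', 'y']) :=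
      pv_last_dot s.toList ['.', 'p', 'y'] (by decide) (by decide) j hj hmax
    have h_pl : PySem.Chars.endswith s.toList ['.', 'p', 'l'] = decide (s.toList.drop j = ['.', 'p', 'l']) :=
      pv_last_dot s.toList ['.', 'p', 'l'] (by decide) (by decide) j hj hmax
    have h_rb : PySem.Chars.endswith s.toList ['.', 'r', 'b'] = decide (s.toList.drop j = ['.', 'r', 'b']) :=
      pv_last_dot s.toList ['.', 'r', 'b'] (by decide) (by decide) j hj hmax
    have h_js : PySem.Chars.endswith s.toList ['.', 'j', 's'] = decide (s.toList.drop j = ['.', 'j', 's']) :=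
      pv_last_dot s.toList ['.', 'j', 's'] (by decide) (by decide) j hj hmax
    have gb_png : ((".png" : String) == PySem.Str.slice s (some ((j : Nat) : Int)) none) = decide (s.toList.drop j = ['.', 'p', 'n', 'g']) := by
      rw [Bool.beq_eq_decide_eq]
      exact decide_eq_decide.mpr (by rw [← String.toList_inj, hu]; exact eq_comm)
    have gp_png : ((".png" : String) = PySem.Str.slice s (some ((j : Nat) : Int)) none) ↔ (s.toList.drop j = ['.', 'p', 'n', 'g']) := by
      rw [← String.toList_inj, hu]; exact eq_comm
    have gb_jpg : ((".jpg" : String) == PySem.Str.slice s (some ((j : Nat) : Int)) none) = decide (s.toList.drop j = ['.', 'j', 'p', 'g']) := by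
      rw [Bool.beq_eq_decide_eq]
      exact decide_eq_decide.mpr (by rw [← String.toList_inj, hu]; exact eq_comm)
    have gp_jpg : ((".jpg" : String) = PySem.Str.slice s (some ((j : Nat) : Int)) none) ↔ (s.toList.drop j = ['.', 'j', 'p', 'g']) := by
      rw [← String.toList_inj, hu]; exact eq_comm
    have gb_jpeg : ((".jpeg" : String) == PySem.Str.slice s (some ((j : Nat) : Int)) none) = decide (s.toList.drop j = ['.', 'j', 'p', 'e', 'g']) := by
      rw [Bool.beq_eq_decide_eq]
      exact decide_eq_decide.mpr (by rw [← String.toList_inj, hu]; exact eq_comm)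
    have gp_jpeg : ((".jpeg" : String) = PySem.Str.slice s (some ((j : Nat) : Int)) none) ↔ (s.toList.drop j = ['.', 'j', 'p', 'e', 'g']) := by
      rw [← String.toList_inj, hu]; exact eq_comm
    have gb_gif : ((".gif" : String) == PySem.Str.slice s (some ((j : Nat) : Int)) none) = decide (s.toList.drop j = ['.', 'g', 'i', 'f']) := by
      rw [Bool.beq_eq_decide_eq]
      exact decide_eq_decide.mpr (by rw [← String.toList_inj, hu]; exact eq_comm)
    have gp_gif : ((".gif" : String) = PySem.Str.slice s (some ((j : Nat) : Int)) none) ↔ (s.toList.drop j = ['.', 'g', 'i', 'f']) := by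
      rw [← String.toList_inj, hu]; exact eq_comm
    have gb_bmp : ((".bmp" : String) == PySem.Str.slice s (some ((j : Nat) : Int)) none) = decide (s.toList.drop j = ['.', 'b', 'm', 'p']) := by
      rw [Bool.beq_eq_decide_eq]
      exact decide_eq_decide.mpr (by rw [← String.toList_inj, hu]; exact eq_comm)
    have gp_bmp : ((".bmp" : String) = PySem.Str.slice s (some ((j : Nat) : Int)) none) ↔ (s.toList.drop j = ['.', 'b', 'm', 'p']) := by
      rw [← String.toList_inj, hu]; exact eq_comm
    have gb_svg : ((".svg" : String) == PySem.Str.slice s (some ((j : Nat) : Int)) none) = decide (s.toList.drop j = ['.', 's', 'v', 'g']) := by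
      rw [Bool.beq_eq_decide_eq]
      exact decide_eq_decide.mpr (by rw [← String.toList_inj, hu]; exact eq_comm)
    have gp_svg : ((".svg" : String) = PySem.Str.slice s (some ((j : Nat) : Int)) none) ↔ (s.toList.drop j = ['.', 's', 'v', 'g']) := by
      rw [← String.toList_inj, hu]; exact eq_comm
    have gb_txt : ((".txt" : String) == PySem.Str.slice s (some ((j : Nat) : Int)) none) = decide (s.toList.drop j = ['.', 't', 'x', 't']) := by
      rw [Bool.beq_eq_decide_eq]
      exact decide_eq_decide.mpr (by rw [← String.toList_inj, hu]; exact eq_comm)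
    have gp_txt : ((".txt" : String) = PySem.Str.slice s (some ((j : Nat) : Int)) none) ↔ (s.toList.drop j = ['.', 't', 'x', 't']) := by
      rw [← String.toList_inj, hu]; exact eq_comm
    have gb_doc : ((".doc" : String) == PySem.Str.slice s (some ((j : Nat) : Int)) none) = decide (s.toList.drop j = ['.', 'd', 'o', 'c']) := by
      rw [Bool.beq_eq_decide_eq]
      exact decide_eq_decide.mpr (by rw [← String.toList_inj, hu]; exact eq_comm)
    have gp_doc : ((".doc" : String) = PySem.Str.slice s (some ((j : Nat) : Int)) none) ↔ (s.toList.drop j = ['.', 'd', 'o', 'c']) := by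
      rw [← String.toList_inj, hu]; exact eq_comm
    have gb_docx : ((".docx" : String) == PySem.Str.slice s (some ((j : Nat) : Int)) none) = decide (s.toList.drop j = ['.', 'd', 'o', 'c', 'x']) := by
      rw [Bool.beq_eq_decide_eq]
      exact decide_eq_decide.mpr (by rw [← String.toList_inj, hu]; exact eq_comm)
    have gp_docx : ((".docx" : String) = PySem.Str.slice s (some ((j : Nat) : Int)) none) ↔ (s.toList.drop j = ['.', 'd', 'o', 'c', 'x']) := by
      rw [← String.toList_inj, hu]; exact eq_comm
    have gb_pdf : ((".pdf" : String) == PySem.Str.slice s (some ((j : Nat) : Int)) none) = decide (s.toList.drop j = ['.', 'p', 'd', 'f']) := by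
      rw [Bool.beq_eq_decide_eq]
      exact decide_eq_decide.mpr (by rw [← String.toList_inj, hu]; exact eq_comm)
    have gp_pdf : ((".pdf" : String) = PySem.Str.slice s (some ((j : Nat) : Int)) none) ↔ (s.toList.drop j = ['.', 'p', 'd', 'f']) := by
      rw [← String.toList_inj, hu]; exact eq_comm
    have gb_md : ((".md" : String) == PySem.Str.slice s (some ((j : Nat) : Int)) none) = decide (s.toList.drop j = ['.', 'm', 'd']) := by
      rw [Bool.beq_eq_decide_eq]
      exact decide_eq_decide.mpr (by rw [← String.toList_inj, hu]; exact eq_comm)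
    have gp_md : ((".md" : String) = PySem.Str.slice s (some ((j : Nat) : Int)) none) ↔ (s.toList.drop j = ['.', 'm', 'd']) := by
      rw [← String.toList_inj, hu]; exact eq_comm
    have gb_zip : ((".zip" : String) == PySem.Str.slice s (some ((j : Nat) : Int)) none) = decide (s.toList.drop j = ['.', 'z', 'i', 'p']) := by
      rw [Bool.beq_eq_decide_eq]
      exact decide_eq_decide.mpr (by rw [← String.toList_inj, hu]; exact eq_comm)
    have gp_zip : ((".zip" : String) = PySem.Str.slice s (some ((j : Nat) : Int)) none) ↔ (s.toList.drop j = ['.', 'z', 'i', 'p']) := by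
      rw [← String.toList_inj, hu]; exact eq_comm
    have gb_tar : ((".tar" : String) == PySem.Str.slice s (some ((j : Nat) : Int)) none) = decide (s.toList.drop j = ['.', 't', 'a', 'r']) := by
      rw [Bool.beq_eq_decide_eq]
      exact decide_eq_decide.mpr (by rw [← String.toList_inj, hu]; exact eq_comm)
    have gp_tar : ((".tar" : String) = PySem.Str.slice s (some ((j : Nat) : Int)) none) ↔ (s.toList.drop j = ['.', 't', 'a', 'r']) := by
      rw [← String.toList_inj, hu]; exact eq_comm
    have gb_gz : ((".gz" : String) == PySem.Str.slice s (some ((j : Nat) : Int)) none) = decide (s.toList.drop j = ['.', 'g', 'z']) := by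
      rw [Bool.beq_eq_decide_eq]
      exact decide_eq_decide.mpr (by rw [← String.toList_inj, hu]; exact eq_comm)
    have gp_gz : ((".gz" : String) = PySem.Str.slice s (some ((j : Nat) : Int)) none) ↔ (s.toList.drop j = ['.', 'g', 'z']) := by
      rw [← String.toList_inj, hu]; exact eq_comm
    have gb_bz2 : ((".bz2" : String) == PySem.Str.slice s (some ((j : Nat) : Int)) none) = decide (s.toList.drop j = ['.', 'b', 'z', '2']) := by
      rw [Bool.beq_eq_decide_eq]
      exact decide_eq_decide.mpr (by rw [← String.toList_inj, hu]; exact eq_comm)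
    have gp_bz2 : ((".bz2" : String) = PySem.Str.slice s (some ((j : Nat) : Int)) none) ↔ (s.toList.drop j = ['.', 'b', 'z', '2']) := by
      rw [← String.toList_inj, hu]; exact eq_comm
    have gb_rar : ((".rar" : String) == PySem.Str.slice s (some ((j : Nat) : Int)) none) = decide (s.toList.drop j = ['.', 'r', 'a', 'r']) := by
      rw [Bool.beq_eq_decide_eq]
      exact decide_eq_decide.mpr (by rw [← String.toList_inj, hu]; exact eq_comm)
    have gp_rar : ((".rar" : String) = PySem.Str.slice s (some ((j : Nat) : Int)) none) ↔ (s.toList.drop j = ['.', 'r', 'a', 'r']) := by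
      rw [← String.toList_inj, hu]; exact eq_comm
    have gb_svz : ((".7z" : String) == PySem.Str.slice s (some ((j : Nat) : Int)) none) = decide (s.toList.drop j = ['.', '7', 'z']) := by
      rw [Bool.beq_eq_decide_eq]
      exact decide_eq_decide.mpr (by rw [← String.toList_inj, hu]; exact eq_comm)
    have gp_svz : ((".7z" : String) = PySem.Str.slice s (some ((j : Nat) : Int)) none) ↔ (s.toList.drop j = ['.', '7', 'z']) := by
      rw [← String.toList_inj, hu]; exact eq_comm
    have gb_conf : ((".conf" : String) == PySem.Str.slice s (some ((j : Nat) : Int)) none) = decide (s.toList.drop j = ['.', 'c', 'o', 'n', 'f']) := by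
      rw [Bool.beq_eq_decide_eq]
      exact decide_eq_decide.mpr (by rw [← String.toList_inj, hu]; exact eq_comm)
    have gp_conf : ((".conf" : String) = PySem.Str.slice s (some ((j : Nat) : Int)) none) ↔ (s.toList.drop j = ['.', 'c', 'o', 'n', 'f']) := by
      rw [← String.toList_inj, hu]; exact eq_comm
    have gb_cfg : ((".cfg" : String) == PySem.Str.slice s (some ((j : Nat) : Int)) none) = decide (s.toList.drop j = ['.', 'c', 'f', 'g']) := by
      rw [Bool.beq_eq_decide_eq]
      exact decide_eq_decide.mpr (by rw [← String.toList_inj, hu]; exact eq_comm)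
    have gp_cfg : ((".cfg" : String) = PySem.Str.slice s (some ((j : Nat) : Int)) none) ↔ (s.toList.drop j = ['.', 'c', 'f', 'g']) := by
      rw [← String.toList_inj, hu]; exact eq_comm
    have gb_ini : ((".ini" : String) == PySem.Str.slice s (some ((j : Nat) : Int)) none) = decide (s.toList.drop j = ['.', 'i', 'n', 'i']) := by
      rw [Bool.beq_eq_decide_eq]
      exact decide_eq_decide.mpr (by rw [← String.toList_inj, hu]; exact eq_comm)
    have gp_ini : ((".ini" : String) = PySem.Str.slice s (some ((j : Nat) : Int)) none) ↔ (s.toList.drop j = ['.', 'i', 'n', 'i']) := by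
      rw [← String.toList_inj, hu]; exact eq_comm
    have gb_yaml : ((".yaml" : String) == PySem.Str.slice s (some ((j : Nat) : Int)) none) = decide (s.toList.drop j = ['.', 'y', 'a', 'm', 'l']) := by
      rw [Bool.beq_eq_decide_eq]
      exact decide_eq_decide.mpr (by rw [← String.toList_inj, hu]; exact eq_comm)
    have gp_yaml : ((".yaml" : String) = PySem.Str.slice s (some ((j : Nat) : Int)) none) ↔ (s.toList.drop j = ['.', 'y', 'a', 'm', 'l']) := by
      rw [← String.toList_inj, hu]; exact eq_comm
    have gb_yml : ((".yml" : String) == PySem.Str.slice s (some ((j : Nat) : Int)) none) = decide (s.toList.drop j = ['.', 'y', 'm', 'l']) := by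
      rw [Bool.beq_eq_decide_eq]
      exact decide_eq_decide.mpr (by rw [← String.toList_inj, hu]; exact eq_comm)
    have gp_yml : ((".yml" : String) = PySem.Str.slice s (some ((j : Nat) : Int)) none) ↔ (s.toList.drop j = ['.', 'y', 'm', 'l']) := by
      rw [← String.toList_inj, hu]; exact eq_comm
    have gb_json : ((".json" : String) == PySem.Str.slice s (some ((j : Nat) : Int)) none) = decide (s.toList.drop j = ['.', 'j', 's', 'o', 'n']) := by
      rw [Bool.beq_eq_decide_eq]
      exact decide_eq_decide.mpr (by rw [← String.toList_inj, hu]; exact eq_comm)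
    have gp_json : ((".json" : String) = PySem.Str.slice s (some ((j : Nat) : Int)) none) ↔ (s.toList.drop j = ['.', 'j', 's', 'o', 'n']) := by
      rw [← String.toList_inj, hu]; exact eq_comm
    have gb_sh : ((".sh" : String) == PySem.Str.slice s (some ((j : Nat) : Int)) none) = decide (s.toList.drop j = ['.', 's', 'h']) := by
      rw [Bool.beq_eq_decide_eq]
      exact decide_eq_decide.mpr (by rw [← String.toList_inj, hu]; exact eq_comm)
    have gp_sh : ((".sh" : String) = PySem.Str.slice s (some ((j : Nat) : Int)) none) ↔ (s.toList.drop j = ['.', 's', 'h']) := by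
      rw [← String.toList_inj, hu]; exact eq_comm
    have gb_py : ((".py" : String) == PySem.Str.slice s (some ((j : Nat) : Int)) none) = decide (s.toList.drop j = ['.', 'p', 'y']) := by
      rw [Bool.beq_eq_decide_eq]
      exact decide_eq_decide.mpr (by rw [← String.toList_inj, hu]; exact eq_comm)
    have gp_py : ((".py" : String) = PySem.Str.slice s (some ((j : Nat) : Int)) none) ↔ (s.toList.drop j = ['.', 'p', 'y']) := by
      rw [← String.toList_inj, hu]; exact eq_comm
    have gb_pl : ((".pl" : String) == PySem.Str.slice s (some ((j : Nat) : Int)) none) = decide (s.toList.drop j = ['.', 'p', 'l']) := by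
      rw [Bool.beq_eq_decide_eq]
      exact decide_eq_decide.mpr (by rw [← String.toList_inj, hu]; exact eq_comm)
    have gp_pl : ((".pl" : String) = PySem.Str.slice s (some ((j : Nat) : Int)) none) ↔ (s.toList.drop j = ['.', 'p', 'l']) := by
      rw [← String.toList_inj, hu]; exact eq_comm
    have gb_rb : ((".rb" : String) == PySem.Str.slice s (some ((j : Nat) : Int)) none) = decide (s.toList.drop j = ['.', 'r', 'b']) := by
      rw [Bool.beq_eq_decide_eq]
      exact decide_eq_decide.mpr (by rw [← String.toList_inj, hu]; exact eq_comm)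
    have gp_rb : ((".rb" : String) = PySem.Str.slice s (some ((j : Nat) : Int)) none) ↔ (s.toList.drop j = ['.', 'r', 'b']) := by
      rw [← String.toList_inj, hu]; exact eq_comm
    have gb_js : ((".js" : String) == PySem.Str.slice s (some ((j : Nat) : Int)) none) = decide (s.toList.drop j = ['.', 'j', 's']) := by
      rw [Bool.beq_eq_decide_eq]
      exact decide_eq_decide.mpr (by rw [← String.toList_inj, hu]; exact eq_comm)
    have gp_js : ((".js" : String) = PySem.Str.slice s (some ((j : Nat) : Int)) none) ↔ (s.toList.drop j = ['.', 'j', 's']) := by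
      rw [← String.toList_inj, hu]; exact eq_comm
    by_cases q_png : s.toList.drop j = ['.', 'p', 'n', 'g']
    · simp [hrj, hq, PySem.Dict.getD, PySem.Dict.get?, pvExtCategory, h_png, h_jpg, h_jpeg, h_gif, h_bmp, h_svg, gb_png, q_png]
    by_cases q_jpg : s.toList.drop j = ['.', 'j', 'p', 'g']
    · simp [hrj, hq, PySem.Dict.getD, PySem.Dict.get?, pvExtCategory, List.find?, h_png, h_jpg, h_jpeg, h_gif, h_bmp, h_svg, gb_png, gb_jpg, q_jpg]
    by_cases q_jpeg : s.toList.drop j = ['.', 'j', 'p', 'e', 'g']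
    · simp [hrj, hq, PySem.Dict.getD, PySem.Dict.get?, pvExtCategory, List.find?, h_png, h_jpg, h_jpeg, h_gif, h_bmp, h_svg, gb_png, gb_jpg, gb_jpeg, q_jpeg]
    by_cases q_gif : s.toList.drop j = ['.', 'g', 'i', 'f']
    · simp [hrj, hq, PySem.Dict.getD, PySem.Dict.get?, pvExtCategory, List.find?, h_png, h_jpg, h_jpeg, h_gif, h_bmp, h_svg, gb_png, gb_jpg, gb_jpeg, gb_gif, q_gif]
    by_cases q_bmp : s.toList.drop j = ['.', 'b', 'm', 'p']
    · simp [hrj, hq, PySem.Dict.getD, PySem.Dict.get?, pvExtCategory, List.find?, h_png, h_jpg, h_jpeg, h_gif, h_bmp, h_svg, gb_png, gb_jpg, gb_jpeg, gb_gif, gb_bmp, q_bmp]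
    by_cases q_svg : s.toList.drop j = ['.', 's', 'v', 'g']
    · simp [hrj, hq, PySem.Dict.getD, PySem.Dict.get?, pvExtCategory, List.find?, h_png, h_jpg, h_jpeg, h_gif, h_bmp, h_svg, gb_png, gb_jpg, gb_jpeg, gb_gif, gb_bmp, gb_svg, q_svg]
    by_cases q_txt : s.toList.drop j = ['.', 't', 'x', 't']
    · simp [hrj, hq, PySem.Dict.getD, PySem.Dict.get?, pvExtCategory, List.find?, h_png, h_jpg, h_jpeg, h_gif, h_bmp, h_svg, h_txt, h_doc, h_docx, h_pdf, h_md, gb_png, gb_jpg, gb_jpeg, gb_gif, gb_bmp, gb_svg, gb_txt, q_txt]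
    by_cases q_doc : s.toList.drop j = ['.', 'd', 'o', 'c']
    · simp [hrj, hq, PySem.Dict.getD, PySem.Dict.get?, pvExtCategory, List.find?, h_png, h_jpg, h_jpeg, h_gif, h_bmp, h_svg, h_txt, h_doc, h_docx, h_pdf, h_md, gb_png, gb_jpg, gb_jpeg, gb_gif, gb_bmp, gb_svg, gb_txt, gb_doc, q_doc]
    by_cases q_docx : s.toList.drop j = ['.', 'd', 'o', 'c', 'x']
    · simp [hrj, hq, PySem.Dict.getD, PySem.Dict.get?, pvExtCategory, List.find?, h_png, h_jpg, h_jpeg, h_gif, h_bmp, h_svg, h_txt, h_doc, h_docx, h_pdf, h_md, gb_png, gb_jpg, gb_jpeg, gb_gif, gb_bmp, gb_svg, gb_txt, gb_doc, gb_docx, q_docx]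
    by_cases q_pdf : s.toList.drop j = ['.', 'p', 'd', 'f']
    · simp [hrj, hq, PySem.Dict.getD, PySem.Dict.get?, pvExtCategory, List.find?, h_png, h_jpg, h_jpeg, h_gif, h_bmp, h_svg, h_txt, h_doc, h_docx, h_pdf, h_md, gb_png, gb_jpg, gb_jpeg, gb_gif, gb_bmp, gb_svg, gb_txt, gb_doc, gb_docx, gb_pdf, q_pdf]
    by_cases q_md : s.toList.drop j = ['.', 'm', 'd']
    · simp [hrj, hq, PySem.Dict.getD, PySem.Dict.get?, pvExtCategory, List.find?, h_png, h_jpg, h_jpeg, h_gif, h_bmp, h_svg, h_txt, h_doc, h_docx, h_pdf, h_md, gb_png, gb_jpg, gb_jpeg, gb_gif, gb_bmp, gb_svg, gb_txt, gb_doc, gb_docx, gb_pdf, gb_md, q_md]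
    by_cases q_zip : s.toList.drop j = ['.', 'z', 'i', 'p']
    · simp [hrj, hq, PySem.Dict.getD, PySem.Dict.get?, pvExtCategory, List.find?, h_png, h_jpg, h_jpeg, h_gif, h_bmp, h_svg, h_txt, h_doc, h_docx, h_pdf, h_md, h_zip, h_tar, h_gz, h_bz2, h_rar, h_svz, gb_png, gb_jpg, gb_jpeg, gb_gif, gb_bmp, gb_svg, gb_txt, gb_doc, gb_docx, gb_pdf, gb_md, gb_zip, q_zip]
    by_cases q_tar : s.toList.drop j = ['.', 't', 'a', 'r']
    · simp [hrj, hq, PySem.Dict.getD, PySem.Dict.get?, pvExtCategory, List.find?, h_png, h_jpg, h_jpeg, h_gif, h_bmp, h_svg, h_txt, h_doc, h_docx, h_pdf, h_md, h_zip, h_tar, h_gz, h_bz2, h_rar, h_svz, gb_png, gb_jpg, gb_jpeg, gb_gif, gb_bmp, gb_svg, gb_txt, gb_doc, gb_docx, gb_pdf, gb_md, gb_zip, gb_tar, q_tar]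
    by_cases q_gz : s.toList.drop j = ['.', 'g', 'z']
    · simp [hrj, hq, PySem.Dict.getD, PySem.Dict.get?, pvExtCategory, List.find?, h_png, h_jpg, h_jpeg, h_gif, h_bmp, h_svg, h_txt, h_doc, h_docx, h_pdf, h_md, h_zip, h_tar, h_gz, h_bz2, h_rar, h_svz, gb_png, gb_jpg, gb_jpeg, gb_gif, gb_bmp, gb_svg, gb_txt, gb_doc, gb_docx, gb_pdf, gb_md, gb_zip, gb_tar, gb_gz, q_gz]
    by_cases q_bz2 : s.toList.drop j = ['.', 'b', 'z', '2']
    · simp [hrj, hq, PySem.Dict.getD, PySem.Dict.get?, pvExtCategory, List.find?, h_png, h_jpg, h_jpeg, h_gif, h_bmp, h_svg, h_txt, h_doc, h_docx, h_pdf, h_md, h_zip, h_tar, h_gz, h_bz2, h_rar, h_svz, gb_png, gb_jpg, gb_jpeg, gb_gif, gb_bmp, gb_svg, gb_txt, gb_doc, gb_docx, gb_pdf, gb_md, gb_zip, gb_tar, gb_gz, gb_bz2, q_bz2]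
    by_cases q_rar : s.toList.drop j = ['.', 'r', 'a', 'r']
    · simp [hrj, hq, PySem.Dict.getD, PySem.Dict.get?, pvExtCategory, List.find?, h_png, h_jpg, h_jpeg, h_gif, h_bmp, h_svg, h_txt, h_doc, h_docx, h_pdf, h_md, h_zip, h_tar, h_gz, h_bz2, h_rar, h_svz, gb_png, gb_jpg, gb_jpeg, gb_gif, gb_bmp, gb_svg, gb_txt, gb_doc, gb_docx, gb_pdf, gb_md, gb_zip, gb_tar, gb_gz, gb_bz2, gb_rar, q_rar]
    by_cases q_svz : s.toList.drop j = ['.', '7', 'z']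
    · simp [hrj, hq, PySem.Dict.getD, PySem.Dict.get?, pvExtCategory, List.find?, h_png, h_jpg, h_jpeg, h_gif, h_bmp, h_svg, h_txt, h_doc, h_docx, h_pdf, h_md, h_zip, h_tar, h_gz, h_bz2, h_rar, h_svz, gb_png, gb_jpg, gb_jpeg, gb_gif, gb_bmp, gb_svg, gb_txt, gb_doc, gb_docx, gb_pdf, gb_md, gb_zip, gb_tar, gb_gz, gb_bz2, gb_rar, gb_svz, q_svz]
    by_cases q_conf : s.toList.drop j = ['.', 'c', 'o', 'n', 'f']
    · simp [hrj, hq, PySem.Dict.getD, PySem.Dict.get?, pvExtCategory, List.find?, h_png, h_jpg, h_jpeg, h_gif, h_bmp, h_svg, h_txt, h_doc, h_docx, h_pdf, h_md, h_zip, h_tar, h_gz, h_bz2, h_rar, h_svz, h_conf, h_cfg, h_ini, h_yaml, h_yml, h_json, gb_png, gb_jpg, gb_jpeg, gb_gif, gb_bmp, gb_svg, gb_txt, gb_doc, gb_docx, gb_pdf, gb_md, gb_zip, gb_tar, gb_gz, gb_bz2, gb_rar, gb_svz, gb_conf, q_conf]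
    by_cases q_cfg : s.toList.drop j = ['.', 'c', 'f', 'g']
    · simp [hrj, hq, PySem.Dict.getD, PySem.Dict.get?, pvExtCategory, List.find?, h_png, h_jpg, h_jpeg, h_gif, h_bmp, h_svg, h_txt, h_doc, h_docx, h_pdf, h_md, h_zip, h_tar, h_gz, h_bz2, h_rar, h_svz, h_conf, h_cfg, h_ini, h_yaml, h_yml, h_json, gb_png, gb_jpg, gb_jpeg, gb_gif, gb_bmp, gb_svg, gb_txt, gb_doc, gb_docx, gb_pdf, gb_md, gb_zip, gb_tar, gb_gz, gb_bz2, gb_rar, gb_svz, gb_conf, gb_cfg, q_cfg]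
    by_cases q_ini : s.toList.drop j = ['.', 'i', 'n', 'i']
    · simp [hrj, hq, PySem.Dict.getD, PySem.Dict.get?, pvExtCategory, List.find?, h_png, h_jpg, h_jpeg, h_gif, h_bmp, h_svg, h_txt, h_doc, h_docx, h_pdf, h_md, h_zip, h_tar, h_gz, h_bz2, h_rar, h_svz, h_conf, h_cfg, h_ini, h_yaml, h_yml, h_json, gb_png, gb_jpg, gb_jpeg, gb_gif, gb_bmp, gb_svg, gb_txt, gb_doc, gb_docx, gb_pdf, gb_md, gb_zip, gb_tar, gb_gz, gb_bz2, gb_rar, gb_svz, gb_conf, gb_cfg, gb_ini, q_ini]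
    by_cases q_yaml : s.toList.drop j = ['.', 'y', 'a', 'm', 'l']
    · simp [hrj, hq, PySem.Dict.getD, PySem.Dict.get?, pvExtCategory, List.find?, h_png, h_jpg, h_jpeg, h_gif, h_bmp, h_svg, h_txt, h_doc, h_docx, h_pdf, h_md, h_zip, h_tar, h_gz, h_bz2, h_rar, h_svz, h_conf, h_cfg, h_ini, h_yaml, h_yml, h_json, gb_png, gb_jpg, gb_jpeg, gb_gif, gb_bmp, gb_svg, gb_txt, gb_doc, gb_docx, gb_pdf, gb_md, gb_zip, gb_tar, gb_gz, gb_bz2, gb_rar, gb_svz, gb_conf, gb_cfg, gb_ini, gb_yaml, q_yaml]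
    by_cases q_yml : s.toList.drop j = ['.', 'y', 'm', 'l']
    · simp [hrj, hq, PySem.Dict.getD, PySem.Dict.get?, pvExtCategory, List.find?, h_png, h_jpg, h_jpeg, h_gif, h_bmp, h_svg, h_txt, h_doc, h_docx, h_pdf, h_md, h_zip, h_tar, h_gz, h_bz2, h_rar, h_svz, h_conf, h_cfg, h_ini, h_yaml, h_yml, h_json, gb_png, gb_jpg, gb_jpeg, gb_gif, gb_bmp, gb_svg, gb_txt, gb_doc, gb_docx, gb_pdf, gb_md, gb_zip, gb_tar, gb_gz, gb_bz2, gb_rar, gb_svz, gb_conf, gb_cfg, gb_ini, gb_yaml, gb_yml, q_yml]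
    by_cases q_json : s.toList.drop j = ['.', 'j', 's', 'o', 'n']
    · simp [hrj, hq, PySem.Dict.getD, PySem.Dict.get?, pvExtCategory, List.find?, h_png, h_jpg, h_jpeg, h_gif, h_bmp, h_svg, h_txt, h_doc, h_docx, h_pdf, h_md, h_zip, h_tar, h_gz, h_bz2, h_rar, h_svz, h_conf, h_cfg, h_ini, h_yaml, h_yml, h_json, gb_png, gb_jpg, gb_jpeg, gb_gif, gb_bmp, gb_svg, gb_txt, gb_doc, gb_docx, gb_pdf, gb_md, gb_zip, gb_tar, gb_gz, gb_bz2, gb_rar, gb_svz, gb_conf, gb_cfg, gb_ini, gb_yaml, gb_yml, gb_json, q_json]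
    by_cases q_sh : s.toList.drop j = ['.', 's', 'h']
    · simp [hrj, hq, PySem.Dict.getD, PySem.Dict.get?, pvExtCategory, List.find?, h_png, h_jpg, h_jpeg, h_gif, h_bmp, h_svg, h_txt, h_doc, h_docx, h_pdf, h_md, h_zip, h_tar, h_gz, h_bz2, h_rar, h_svz, h_conf, h_cfg, h_ini, h_yaml, h_yml, h_json, h_sh, h_py, h_pl, h_rb, h_js, gb_png, gb_jpg, gb_jpeg, gb_gif, gb_bmp, gb_svg, gb_txt, gb_doc, gb_docx, gb_pdf, gb_md, gb_zip, gb_tar, gb_gz, gb_bz2, gb_rar, gb_svz, gb_conf, gb_cfg, gb_ini, gb_yaml, gb_yml, gb_json, gb_sh, q_sh]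
    by_cases q_py : s.toList.drop j = ['.', 'p', 'y']
    · simp [hrj, hq, PySem.Dict.getD, PySem.Dict.get?, pvExtCategory, List.find?, h_png, h_jpg, h_jpeg, h_gif, h_bmp, h_svg, h_txt, h_doc, h_docx, h_pdf, h_md, h_zip, h_tar, h_gz, h_bz2, h_rar, h_svz, h_conf, h_cfg, h_ini, h_yaml, h_yml, h_json, h_sh, h_py, h_pl, h_rb, h_js, gb_png, gb_jpg, gb_jpeg, gb_gif, gb_bmp, gb_svg, gb_txt, gb_doc, gb_docx, gb_pdf, gb_md, gb_zip, gb_tar, gb_gz, gb_bz2, gb_rar, gb_svz, gb_conf, gb_cfg, gb_ini, gb_yaml, gb_yml, gb_json, gb_sh, gb_py, q_py]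
    by_cases q_pl : s.toList.drop j = ['.', 'p', 'l']
    · simp [hrj, hq, PySem.Dict.getD, PySem.Dict.get?, pvExtCategory, List.find?, h_png, h_jpg, h_jpeg, h_gif, h_bmp, h_svg, h_txt, h_doc, h_docx, h_pdf, h_md, h_zip, h_tar, h_gz, h_bz2, h_rar, h_svz, h_conf, h_cfg, h_ini, h_yaml, h_yml, h_json, h_sh, h_py, h_pl, h_rb, h_js, gb_png, gb_jpg, gb_jpeg, gb_gif, gb_bmp, gb_svg, gb_txt, gb_doc, gb_docx, gb_pdf, gb_md, gb_zip, gb_tar, gb_gz, gb_bz2, gb_rar, gb_svz, gb_conf, gb_cfg, gb_ini, gb_yaml, gb_yml, gb_json, gb_sh, gb_py, gb_pl, q_pl]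
    by_cases q_rb : s.toList.drop j = ['.', 'r', 'b']
    · simp [hrj, hq, PySem.Dict.getD, PySem.Dict.get?, pvExtCategory, List.find?, h_png, h_jpg, h_jpeg, h_gif, h_bmp, h_svg, h_txt, h_doc, h_docx, h_pdf, h_md, h_zip, h_tar, h_gz, h_bz2, h_rar, h_svz, h_conf, h_cfg, h_ini, h_yaml, h_yml, h_json, h_sh, h_py, h_pl, h_rb, h_js, gb_png, gb_jpg, gb_jpeg, gb_gif, gb_bmp, gb_svg, gb_txt, gb_doc, gb_docx, gb_pdf, gb_md, gb_zip, gb_tar, gb_gz, gb_bz2, gb_rar, gb_svz, gb_conf, gb_cfg, gb_ini, gb_yaml, gb_yml, gb_json, gb_sh, gb_py, gb_pl, gb_rb, q_rb]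
    by_cases q_js : s.toList.drop j = ['.', 'j', 's']
    · simp [hrj, hq, PySem.Dict.getD, PySem.Dict.get?, pvExtCategory, List.find?, h_png, h_jpg, h_jpeg, h_gif, h_bmp, h_svg, h_txt, h_doc, h_docx, h_pdf, h_md, h_zip, h_tar, h_gz, h_bz2, h_rar, h_svz, h_conf, h_cfg, h_ini, h_yaml, h_yml, h_json, h_sh, h_py, h_pl, h_rb, h_js, gb_png, gb_jpg, gb_jpeg, gb_gif, gb_bmp, gb_svg, gb_txt, gb_doc, gb_docx, gb_pdf, gb_md, gb_zip, gb_tar, gb_gz, gb_bz2, gb_rar, gb_svz, gb_conf, gb_cfg, gb_ini, gb_yaml, gb_yml, gb_json, gb_sh, gb_py, gb_pl, gb_rb, gb_js, q_js]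
    simp [hrj, hq, PySem.Dict.getD, PySem.Dict.get?, pvExtCategory, List.find?, h_png, h_jpg, h_jpeg, h_gif, h_bmp, h_svg, h_txt, h_doc, h_docx, h_pdf, h_md, h_zip, h_tar, h_gz, h_bz2, h_rar, h_svz, h_conf, h_cfg, h_ini, h_yaml, h_yml, h_json, h_sh, h_py, h_pl, h_rb, h_js, gb_png, gb_jpg, gb_jpeg, gb_gif, gb_bmp, gb_svg, gb_txt, gb_doc, gb_docx, gb_pdf, gb_md, gb_zip, gb_tar, gb_gz, gb_bz2, gb_rar, gb_svz, gb_conf, gb_cfg, gb_ini, gb_yaml, gb_yml, gb_json, gb_sh, gb_py, gb_pl, gb_rb, gb_js, q_png, q_jpg, q_jpeg, q_gif, q_bmp, q_svg, q_txt, q_doc, q_docx, q_pdf, q_md, q_zip, q_tar, q_gz, q_bz2, q_rar, q_svz, q_conf, q_cfg, q_ini, q_yaml, q_yml, q_json, q_sh, q_py, q_pl, q_rb, q_js]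

-- ===== VERDICT (by name: the statement is the Claim_ definition above) =====
theorem determine_file_type_py_spec : Claim_equal_determine_file_type_py := by
  intro permissions name _
  unfold Spec_determine_file_type_py determine_file_type_py determine_file_type_py_alt
  cases PySem.Str.startswith permissions "d" with
  | true => simp
  | false =>
  cases PySem.Str.startswith permissions "l" with
  | true => simp
  | false =>
  cases PySem.Str.isIn "x" (PySem.Str.slice permissions (some 1) (some 4)) with
  | true => simp
  | false =>
    simp only [Bool.false_eq_true, if_false]
    exact pv_tail (PySem.Str.lower name)
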